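-- pv_equiv track=rewrite | github.com/ibtSdan/1Day1Problem | 프로그래머스/0/181855. 문자열 묶기/문자열 묶기.py | solution
-- ===== SOURCE A (Python) =====
-- def solution(strArr):
--     dic = {}
--     for s in strArr:
--         l = len(s)
--         if l not in dic:
--             dic[l] = 1
--         else:
--             dic[l] += 1
--
--     ans = 0
--     for key in dic:
--         if dic[key]>ans:
--             ans = dic[key]
--     return ans
-- ===== SOURCE B (Python) =====
-- def solution(strArr):
--     best = 0
--     cur = 0
--     prev = None
--     for L in sorted(len(s) for s in strArr):
--         if L == prev:
--             cur += 1
--         else: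
--             cur = 1
--         prev = L
--         if cur > best:
--             best = cur
--     return best
-- ===== Notes on version B (the rewrite author's own statement) =====
-- stated objective: alternative
-- what changed: B sorts the lengths and makes a single run-length scan, returning the longest run of equal consecutive values, instead of building a length-histogram dict and taking the max of its counts.
import Mathlib
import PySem

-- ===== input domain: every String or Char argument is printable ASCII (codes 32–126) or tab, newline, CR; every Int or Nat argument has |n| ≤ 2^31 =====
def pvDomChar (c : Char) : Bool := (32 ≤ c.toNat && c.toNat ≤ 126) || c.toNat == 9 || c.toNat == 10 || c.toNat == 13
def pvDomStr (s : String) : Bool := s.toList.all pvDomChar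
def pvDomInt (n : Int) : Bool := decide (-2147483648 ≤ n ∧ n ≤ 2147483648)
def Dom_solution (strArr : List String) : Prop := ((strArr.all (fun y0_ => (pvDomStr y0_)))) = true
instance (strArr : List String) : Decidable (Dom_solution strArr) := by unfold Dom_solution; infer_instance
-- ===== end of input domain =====

-- B sorts the lengths and returns the longest run of equal consecutive values in one scan,
-- instead of A's length-histogram dict followed by a max over its counts (objective: alternative).

-- ===== PORT A =====
def solution (strArr : List String) : Int :=
  let dic : PySem.Dict Int Int :=
    strArr.foldl (fun dic s =>
      let l := PySem.Str.len s
      if dic.contains l = false then dic.insert l 1 else dic.modify l 0 (· + 1))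
      PySem.Dict.empty
  -- 'dic[key]' never raises here: key ranges over dic.keys
  dic.keys.foldl (fun ans key =>
    if dic.getD key 0 > ans then dic.getD key 0 else ans) 0

-- ===== PORT B =====
def solution_alt (strArr : List String) : Int :=
  -- 'for L in sorted(len(s) for s in strArr)' with state (best, cur, prev); prev starts as None
  let st :=
    (PySem.List.sorted (strArr.map PySem.Str.len) (fun x => x) false).foldl
      (fun (st : Int × Int × Option Int) L =>
        let cur := if some L == st.2.2 then st.2.1 + 1 else 1
        let best := if cur > st.1 then cur else st.1
        (best, cur, some L))
      (0, 0, none)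
  st.1

-- ===== PRECONDITION & SPEC =====
def Spec_solution (strArr : List String) (out : Int) : Prop := out = solution_alt strArr
instance (strArr : List String) (out : Int) : Decidable (Spec_solution strArr out) := by unfold Spec_solution; infer_instance

-- ===== CLAIM (what is proved, stated in full; the proofs are below) =====
def Claim_equal_solution : Prop := ∀ (strArr : List String), Dom_solution strArr → Spec_solution strArr (solution strArr)

-- ===== LEMMAS AND PROOFS =====

-- the "maximum cur' ever reached from state (cur, prev)" part of B's scan
def runMax : List Int → Int → Option Int → Int
  | [], _, _ => 0
  | L :: t, cur, prev =>
    let cur' := if some L == prev then cur + 1 else 1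
    max cur' (runMax t cur' (some L))

-- A's answer, written as a running max of the counts of the distinct values
def bestM (xs : List Int) : Int :=
  ((PySem.Set.ofList xs).map (fun v => (xs.count v : Int))).foldl max 0

theorem foldl_fst_eq_max_runMax (ys : List Int) :
    ∀ (best cur : Int) (prev : Option Int), 0 ≤ best →
    (ys.foldl (fun (st : Int × Int × Option Int) L =>
        let cur := if some L == st.2.2 then st.2.1 + 1 else 1
        let best := if cur > st.1 then cur else st.1
        (best, cur, some L)) (best, cur, prev)).1
      = max best (runMax ys cur prev) := by
  induction ys with
  | nil => intro best cur prev hb; simp [runMax]; omega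
  | cons L t ih =>
    intro best cur prev hb
    simp only [List.foldl_cons, runMax]
    rw [ih _ _ _ (by split_ifs <;> omega)]
    split_ifs <;> omega

theorem runMax_reset (L : Int) (t : List Int) (c c' : Int) (p p' : Option Int)
    (h : p ≠ some L) (h' : p' ≠ some L) :
    runMax (L :: t) c p = runMax (L :: t) c' p' := by
  simp [runMax, Ne.symm h, Ne.symm h']

theorem runMax_nonneg (ys : List Int) (c : Int) (p : Option Int) : 0 ≤ runMax ys c p := by
  induction ys generalizing c p with
  | nil => exact le_refl 0
  | cons L t ih => simp only [runMax]; have := ih (if some L == p then c + 1 else 1) (some L); omega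

theorem runMax_run (k : Nat) (x : Int) (t : List Int) (c : Int)
    (ht : t.head? ≠ some x) :
    runMax (List.replicate (k+1) x ++ t) c (some x)
      = max (c + k + 1) (runMax t 0 none) := by
  induction k generalizing c with
  | zero =>
    rw [List.replicate_one, List.singleton_append]
    simp only [runMax, beq_self_eq_true, if_true]
    cases t with
    | nil => simp [runMax]
    | cons y t' =>
      have hy : y ≠ x := by simpa using ht
      rw [runMax_reset y t' (c + 1) 0 (some x) none (by simp [Ne.symm hy]) (by simp)]
      push_cast; omega
  | succ k ih =>
    rw [List.replicate_succ, List.cons_append]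
    simp only [runMax, beq_self_eq_true, if_true]
    rw [ih (c + 1)]
    have := runMax_nonneg t 0 none
    push_cast; omega

-- A's 'if l not in dic: dic[l]=1 else: dic[l]+=1' is exactly the Counter update step.
theorem insert_one_eq_modify (d : PySem.Dict Int Int) (k : Int) (h : d.contains k = false) :
    d.insert k 1 = d.modify k 0 (· + 1) := by
  have hn : d.get? k = none := by
    rw [PySem.Dict.get?_eq_none_iff_contains]; exact h
  have hgetD : d.getD k 0 = 0 := by simp [PySem.Dict.getD, hn]
  apply PySem.Dict.ext
  simp [PySem.Dict.insert, PySem.Dict.modify, hgetD]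

-- the run lemma restarted from the initial state (prev = None)
theorem runMax_run_none (k : Nat) (x : Int) (t : List Int) (ht : t.head? ≠ some x) :
    runMax (List.replicate (k+1) x ++ t) 0 none = max ((k : Int) + 1) (runMax t 0 none) := by
  rw [List.replicate_succ, List.cons_append]
  have hbeq : (some x == (none : Option Int)) = false := rfl
  simp only [runMax, hbeq, Bool.false_eq_true, if_false]
  cases k with
  | zero =>
    simp only [List.replicate_zero, List.nil_append]
    cases t with
    | nil => simp [runMax]
    | cons y t' =>
      have hy : y ≠ x := by simpa using ht
      rw [runMax_reset y t' 1 0 (some x) none (by simp [Ne.symm hy]) (by simp)]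
      push_cast; omega
  | succ k =>
    rw [runMax_run k x t 1 ht]
    have := runMax_nonneg t 0 none
    push_cast; omega

theorem sorted_split (ys : List Int) (x : Int) (t0 : List Int)
    (h : ys.Pairwise (· ≤ ·)) (hy : ys = x :: t0) :
    ∃ k t, ys = List.replicate (k+1) x ++ t ∧ t.head? ≠ some x ∧
      t.Pairwise (· ≤ ·) ∧ x ∉ t := by
  subst hy
  induction t0 generalizing x with
  | nil => exact ⟨0, [], by simp, by simp, List.Pairwise.nil, by simp⟩
  | cons y t' ih =>
    by_cases hxy : y = x
    · subst hxy
      obtain ⟨k, t, heq, hhd, hp, hx⟩ := ih y h.of_cons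
      exact ⟨k + 1, t, by rw [List.replicate_succ, List.cons_append, heq], hhd, hp, hx⟩
    · refine ⟨0, y :: t', by simp, by simpa using (Ne.symm (fun e => hxy e.symm)), h.of_cons, ?_⟩
      intro hmem
      have hxle : ∀ z ∈ y :: t', x ≤ z := (List.pairwise_cons.mp h).1
      rcases List.mem_cons.mp hmem with he | hmem'
      · exact hxy he.symm
      · have h1 : x ≤ y := hxle y (List.mem_cons_self)
        have h2 : y ≤ x := (List.pairwise_cons.mp h.of_cons).1 x hmem'
        exact hxy (by omega)

theorem foldl_max_max (l : List Int) (a b : Int) :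
    l.foldl max (max a b) = max a (l.foldl max b) := by
  induction l generalizing b with
  | nil => rfl
  | cons c l ih => simp only [List.foldl_cons, max_assoc]; exact ih (max b c)

theorem foldl_max_perm {l₁ l₂ : List Int} (h : l₁.Perm l₂) (a : Int) :
    l₁.foldl max a = l₂.foldl max a := by
  induction h generalizing a with
  | nil => rfl
  | cons x _ ih => simp only [List.foldl_cons]; exact ih _
  | swap x y l => simp only [List.foldl_cons]; congr 1; omega
  | trans _ _ ih1 ih2 => exact (ih1 a).trans (ih2 a)

theorem bestM_nonneg (xs : List Int) : 0 ≤ bestM xs := by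
  exact (PySem.List.le_foldl_max _ 0).1

theorem bestM_perm {xs ys : List Int} (h : xs.Perm ys) : bestM xs = bestM ys := by
  unfold bestM
  have hset : (PySem.Set.ofList xs).Perm (PySem.Set.ofList ys) := by
    refine (List.perm_ext_iff_of_nodup (PySem.Set.nodup_ofList xs) (PySem.Set.nodup_ofList ys)).mpr ?_
    intro a; rw [PySem.Set.mem_ofList, PySem.Set.mem_ofList]; exact ⟨h.mem_iff.mp, h.mem_iff.mpr⟩
  have hc : (fun v => ((xs.count v : Nat) : Int)) = fun v => ((ys.count v : Nat) : Int) := by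
    funext v; rw [h.count_eq]
  rw [hc]
  exact foldl_max_perm (hset.map _) 0

theorem bestM_split (k : Nat) (x : Int) (t : List Int) (hx : x ∉ t) :
    bestM (List.replicate (k+1) x ++ t) = max ((k : Int) + 1) (bestM t) := by
  unfold bestM
  set ys := List.replicate (k+1) x ++ t with hys
  have hset : (PySem.Set.ofList ys).Perm (x :: PySem.Set.ofList t) := by
    refine (List.perm_ext_iff_of_nodup (PySem.Set.nodup_ofList ys) ?_).mpr ?_
    · exact List.nodup_cons.mpr ⟨fun hm => hx ((PySem.Set.mem_ofList _ _).mp hm), PySem.Set.nodup_ofList t⟩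
    · intro a
      simp only [PySem.Set.mem_ofList, hys, List.mem_append, List.mem_replicate, List.mem_cons]
      constructor
      · rintro (⟨_, e⟩ | hm) ; exact Or.inl e; exact Or.inr hm
      · rintro (e | hm); exact Or.inl ⟨Nat.succ_ne_zero k, e⟩; exact Or.inr hm
  rw [foldl_max_perm (hset.map _) 0]
  simp only [List.map_cons, List.foldl_cons]
  have hcx : ys.count x = k + 1 := by
    rw [hys, List.count_append, List.count_replicate]
    simp [List.count_eq_zero.mpr hx]
  have hmap : (PySem.Set.ofList t).map (fun v => ((ys.count v : Nat) : Int))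
      = (PySem.Set.ofList t).map (fun v => ((t.count v : Nat) : Int)) := by
    refine List.map_congr_left ?_
    intro v hv
    have hvx : v ≠ x := fun e => hx (e ▸ (PySem.Set.mem_ofList _ _).mp hv)
    rw [hys, List.count_append, List.count_replicate]
    simp [Ne.symm hvx]
  rw [hmap, hcx]
  have h0 : max 0 ((↑(k + 1) : Int)) = max ((k : Int) + 1) 0 := by push_cast; omega
  rw [h0, foldl_max_max]

theorem runMax_eq_bestM (ys : List Int) (h : ys.Pairwise (· ≤ ·)) :
    runMax ys 0 none = bestM ys := by
  suffices H : ∀ (n : Nat) (ys : List Int), ys.length ≤ n → ys.Pairwise (· ≤ ·) →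
      runMax ys 0 none = bestM ys from H ys.length ys le_rfl h
  intro n
  induction n with
  | zero =>
    intro ys hlen _
    rw [List.length_eq_zero_iff.mp (Nat.le_zero.mp hlen)]
    simp [runMax, bestM, PySem.Set.ofList]
  | succ n ih =>
    intro ys hlen hp
    cases ys with
    | nil => simp [runMax, bestM, PySem.Set.ofList]
    | cons x t0 =>
      obtain ⟨k, t, heq, hhd, htp, hxt⟩ := sorted_split (x :: t0) x t0 hp rfl
      rw [heq] at hlen ⊢
      rw [runMax_run_none k x t hhd, bestM_split k x t hxt]
      have hlt : t.length ≤ n := by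
        rw [List.length_append, List.length_replicate] at hlen; omega
      rw [ih t hlt htp]

theorem solution_eq_bestM (strArr : List String) :
    solution strArr = bestM (strArr.map PySem.Str.len) := by
  unfold solution
  have hfun : (fun (dic : PySem.Dict Int Int) (s : String) =>
      let l := PySem.Str.len s
      if dic.contains l = false then dic.insert l 1 else dic.modify l 0 (· + 1))
      = fun dic s => dic.modify (PySem.Str.len s) 0 (· + 1) := by
    funext d s
    show (if d.contains (PySem.Str.len s) = false then d.insert (PySem.Str.len s) 1
          else d.modify (PySem.Str.len s) 0 (· + 1)) = d.modify (PySem.Str.len s) 0 (· + 1)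
    by_cases h : d.contains (PySem.Str.len s) = false
    · rw [if_pos h]; exact insert_one_eq_modify d _ h
    · rw [if_neg h]
  rw [hfun]
  have hdic : strArr.foldl (fun dic s => dic.modify (PySem.Str.len s) 0 (· + 1)) PySem.Dict.empty
      = PySem.Dict.counter (strArr.map PySem.Str.len) := by
    rw [PySem.Dict.counter_eq_foldl, List.foldl_map]
  rw [hdic]
  set xs := strArr.map PySem.Str.len with hxs
  show (PySem.Dict.counter xs).keys.foldl
      (fun ans key => if (PySem.Dict.counter xs).getD key 0 > ans
        then (PySem.Dict.counter xs).getD key 0 else ans) 0 = bestM xs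
  have hg : (fun (ans key : Int) =>
        if (PySem.Dict.counter xs).getD key 0 > ans
        then (PySem.Dict.counter xs).getD key 0 else ans)
      = fun ans key => max ans ((xs.count key : Nat) : Int) := by
    funext ans key
    simp only [PySem.Dict.getD_counter]
    split_ifs <;> omega
  rw [hg, PySem.Dict.keys_counter]
  unfold bestM
  rw [List.foldl_map]

-- ===== VERDICT (by name: the statement is the Claim_ definition above) =====
theorem solution_spec : Claim_equal_solution := by
  intro strArr _
  unfold Spec_solution
  rw [solution_eq_bestM]
  unfold solution_alt
  rw [foldl_fst_eq_max_runMax _ _ _ _ le_rfl]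
  rw [runMax_eq_bestM _ (PySem.List.sorted_pairwise _ _),
      bestM_perm (PySem.List.sorted_perm (strArr.map PySem.Str.len) (fun x => x) false)]
  exact (max_eq_right (bestM_nonneg _)).symm
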